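-- pv_equiv track=rewrite | github.com/bensonlee5/nanochat | scripts/lane_b_infer_ratio.py | _latest_monotonic_step_segment
-- ===== SOURCE A (Python) =====
-- def _latest_monotonic_step_segment(step_metric_pairs):
--     if not step_metric_pairs:
--         return []
--     start_idx = 0
--     prev_step = -1
--     for i, (step, _) in enumerate(step_metric_pairs):
--         if step < prev_step:
--             start_idx = i
--         prev_step = step
--     return step_metric_pairs[start_idx:]
-- ===== SOURCE B (Python) =====
-- def _latest_monotonic_step_segment(step_metric_pairs):
--     if not step_metric_pairs:
--         return []
--     j = len(step_metric_pairs) - 1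
--     while j > 0 and step_metric_pairs[j - 1][0] <= step_metric_pairs[j][0]:
--         j -= 1
--     return step_metric_pairs[j:]
-- ===== Notes on version B (the rewrite author's own statement) =====
-- stated objective: alternative
-- what changed: Replaces the full forward pass (enumerate + start-index/prev-step state) with a backward walk from the last element that stops early at the first decrease, then slices from there.
import Mathlib
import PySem

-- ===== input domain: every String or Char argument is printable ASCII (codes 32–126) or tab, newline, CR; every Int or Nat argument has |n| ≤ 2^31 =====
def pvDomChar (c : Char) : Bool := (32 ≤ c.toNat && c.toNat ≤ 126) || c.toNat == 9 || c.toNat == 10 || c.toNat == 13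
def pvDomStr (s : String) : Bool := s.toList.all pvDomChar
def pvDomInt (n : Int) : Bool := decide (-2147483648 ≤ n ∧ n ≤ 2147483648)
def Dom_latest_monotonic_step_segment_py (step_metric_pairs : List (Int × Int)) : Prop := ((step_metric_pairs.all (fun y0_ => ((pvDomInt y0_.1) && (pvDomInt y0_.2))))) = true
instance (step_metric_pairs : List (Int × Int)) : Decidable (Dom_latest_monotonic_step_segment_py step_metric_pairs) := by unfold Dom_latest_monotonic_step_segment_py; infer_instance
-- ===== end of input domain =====

-- B walks backward from the last pair and stops at the first decrease (early exit),
-- instead of A's full forward pass maintaining a start index; same return value.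

-- ===== PORT A =====
-- forward pass: fold over enumerate(pairs) carrying (start_idx, prev_step)
def latest_monotonic_step_segment_py (step_metric_pairs : List (Int × Int)) : List (Int × Int) :=
  if step_metric_pairs = [] then []
  else
    let st := (PySem.List.enumerate step_metric_pairs 0).foldl
      (fun (st : Int × Int) ip =>
        (if ip.2.1 < st.2 then ip.1 else st.1, ip.2.1)) (0, -1)
    PySem.List.slice step_metric_pairs (some st.1) none

-- ===== PORT B =====
-- backward while-loop: decrement j while j > 0 and pairs[j-1][0] <= pairs[j][0]
def lmssAltLoop (pairs : List (Int × Int)) : Nat → Nat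
  | 0 => 0
  | (j+1) => if (pairs.getD j (0, 0)).1 ≤ (pairs.getD (j+1) (0, 0)).1
             then lmssAltLoop pairs j else j + 1

def latest_monotonic_step_segment_py_alt (step_metric_pairs : List (Int × Int)) : List (Int × Int) :=
  if step_metric_pairs = [] then []
  else step_metric_pairs.drop (lmssAltLoop step_metric_pairs (step_metric_pairs.length - 1))

-- ===== PRECONDITION & SPEC =====
def Spec_latest_monotonic_step_segment_py (step_metric_pairs : List (Int × Int)) (out : List (Int × Int)) : Prop := out = latest_monotonic_step_segment_py_alt step_metric_pairs
instance (step_metric_pairs : List (Int × Int)) (out : List (Int × Int)) : Decidable (Spec_latest_monotonic_step_segment_py step_metric_pairs out) := by unfold Spec_latest_monotonic_step_segment_py; infer_instance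

-- ===== CLAIM (what is proved, stated in full; the proofs are below) =====
def Claim_equal_latest_monotonic_step_segment_py : Prop := ∀ (step_metric_pairs : List (Int × Int)), Dom_latest_monotonic_step_segment_py step_metric_pairs → Spec_latest_monotonic_step_segment_py step_metric_pairs (latest_monotonic_step_segment_py step_metric_pairs)

-- ===== LEMMAS AND PROOFS =====

-- A's fold, named for the proofs
def lmssFold (pairs : List (Int × Int)) : Int × Int :=
  (PySem.List.enumerate pairs 0).foldl
    (fun (st : Int × Int) ip => (if ip.2.1 < st.2 then ip.1 else st.1, ip.2.1)) (0, -1)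

lemma lmssFold_append (xs : List (Int × Int)) (x : Int × Int) :
    lmssFold (xs ++ [x]) =
      (if x.1 < (lmssFold xs).2 then (xs.length : Int) else (lmssFold xs).1, x.1) := by
  unfold lmssFold
  rw [PySem.List.enumerate_append, List.foldl_append]
  simp [PySem.List.enumerate]

lemma lmssAltLoop_append (xs : List (Int × Int)) (x : Int × Int) (j : Nat) (hj : j < xs.length) :
    lmssAltLoop (xs ++ [x]) j = lmssAltLoop xs j := by
  induction j with
  | zero => rfl
  | succ j ih =>
      have h1 : (xs ++ [x]).getD j (0, 0) = xs.getD j (0, 0) := by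
        rw [List.getD_append]; omega
      have h2 : (xs ++ [x]).getD (j + 1) (0, 0) = xs.getD (j + 1) (0, 0) := by
        rw [List.getD_append]; omega
      simp only [lmssAltLoop, h1, h2]
      rw [ih (by omega)]

lemma lmssFold_snd (xs : List (Int × Int)) (x : Int × Int) :
    (lmssFold (xs ++ [x])).2 = x.1 := by
  rw [lmssFold_append]

-- main invariant: the forward fold's start index equals the backward loop's stop index
lemma lmss_main (xs : List (Int × Int)) (h : xs ≠ []) :
    (lmssFold xs).1 = ((lmssAltLoop xs (xs.length - 1) : Nat) : Int) := by
  induction xs using List.reverseRecOn with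
  | nil => cases h rfl
  | append_singleton ys y ih =>
      rw [lmssFold_append]
      rcases eq_or_ne ys [] with hys | hys
      · subst hys
        simp only [lmssFold, PySem.List.enumerate, List.foldl_nil,
          List.length_nil, Nat.cast_zero]
        split_ifs <;> rfl
      · have hlen : 0 < ys.length := List.length_pos_iff.mpr hys
        have hgetlast : (ys ++ [y]).getD (ys.length - 1) (0, 0) = ys.getD (ys.length - 1) (0, 0) := by
          rw [List.getD_append]; omega
        have hgety : (ys ++ [y]).getD ys.length (0, 0) = y := by
          simp [List.getD_eq_getElem?_getD]
        have hsnd : (lmssFold ys).2 = (ys.getD (ys.length - 1) (0, 0)).1 := by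
          rcases List.eq_nil_or_concat ys with h' | ⟨zs, z, rfl⟩
          · exact absurd h' hys
          · rw [List.concat_eq_append, lmssFold_snd]
            simp [List.getD_eq_getElem?_getD]
        have hloop : lmssAltLoop (ys ++ [y]) ((ys ++ [y]).length - 1)
            = if (ys.getD (ys.length - 1) (0, 0)).1 ≤ y.1
              then lmssAltLoop ys (ys.length - 1) else ys.length := by
          have : (ys ++ [y]).length - 1 = (ys.length - 1) + 1 := by
            simp [List.length_append]; omega
          rw [this]
          simp only [lmssAltLoop]
          have : ys.length - 1 + 1 = ys.length := by omega
          rw [this, hgety, hgetlast]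
          split_ifs with hc
          · exact lmssAltLoop_append ys y _ (by omega)
          · omega
        rw [hloop, hsnd]
        split_ifs with h1 h2 h2
        · omega
        · rfl
        · exact ih hys
        · omega

lemma lmss_slice_eq_drop (xs : List (Int × Int)) (k : Nat) :
    PySem.List.slice xs (some (k : Int)) none = xs.drop k :=
  PySem.List.slice_from_natCast xs k

-- ===== VERDICT (by name: the statement is the Claim_ definition above) =====
theorem latest_monotonic_step_segment_py_spec : Claim_equal_latest_monotonic_step_segment_py := by
  intro xs _
  unfold Spec_latest_monotonic_step_segment_py
  unfold latest_monotonic_step_segment_py latest_monotonic_step_segment_py_alt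
  rcases eq_or_ne xs [] with rfl | h
  · simp
  · simp only [h, reduceIte]
    rw [show (PySem.List.enumerate xs 0).foldl
      (fun (st : Int × Int) ip => (if ip.2.1 < st.2 then ip.1 else st.1, ip.2.1)) (0, -1)
      = lmssFold xs from rfl]
    rw [lmss_main xs h, lmss_slice_eq_drop]
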